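-- pv_equiv track=rewrite | github.com/JJCuh/Adv-Des-Anal-of-Algorithms | COEN379HW8.py | longestPreSuf
-- ===== SOURCE A (Python) =====
-- def compute_Z(s):
--     n = len(s)
--     l = 0
--     r = 1
--     z = [0 for i in range(n)]
--
--     for k in range(1, n):
--         if r <= k:
--             x = 0
--             while k + x < n and s[x] == s[k+x]:
--                 x += 1
--             z[k] = x
--             l = k
--             r = k + z[k]
--         elif k + z[k-l] < r:
--             z[k] = z[k-l]
--         else:
--             x = r - k
--             while k + x < n and s[x] == s[k+x]:
--                 x += 1
--             z[k] = x
--             l = k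
--             r = k + z[k]
--
--     return z
--
-- def longestPreSuf(s, t):
--     st = s + t
--     z = compute_Z(st)
--     n = len(z)
--
--     a = 0
--     for k in range(n):
--         val = z[k]
--         if (k + val == n):
--             if (val <= min(len(s), len(t)) and val > a):
--                 a = val
--
--     return s[:a]
-- ===== SOURCE B (Python) =====
-- def longestPreSuf(s, t):
--     m = min(len(s), len(t))
--     for L in range(m, 0, -1):
--         if s[:L] == t[len(t)-L:]:
--             return s[:L]
--     return ""
-- ===== Notes on version B (the rewrite author's own statement) =====
-- stated objective: simpler
-- what changed: Replaced the Z-algorithm (compute_Z over s+t plus a max-scan of the Z table) with a direct downward scan that returns s[:L] for the largest L <= min(len(s),len(t)) with s[:L] == t[len(t)-L:].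
import Mathlib
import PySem

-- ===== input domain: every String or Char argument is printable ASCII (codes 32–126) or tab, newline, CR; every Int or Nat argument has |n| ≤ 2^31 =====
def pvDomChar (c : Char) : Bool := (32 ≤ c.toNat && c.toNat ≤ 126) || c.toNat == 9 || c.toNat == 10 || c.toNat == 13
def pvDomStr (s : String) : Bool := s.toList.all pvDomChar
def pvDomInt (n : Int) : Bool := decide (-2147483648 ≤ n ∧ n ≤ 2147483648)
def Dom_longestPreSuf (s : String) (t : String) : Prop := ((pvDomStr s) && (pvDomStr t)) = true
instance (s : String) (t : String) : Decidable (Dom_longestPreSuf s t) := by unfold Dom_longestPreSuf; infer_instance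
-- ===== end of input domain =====

-- B replaces A's Z-algorithm (compute_Z on s+t, then a max-scan over the Z table) with a direct
-- downward scan comparing s[:L] against t[len(t)-L:]; simpler (no prefix-index table), not faster.

-- ===== PORT A =====
-- the inner `while k + x < n and s[x] == s[k+x]: x += 1` loop of compute_Z
-- (identical in both branches of the Python loop, hence one shared helper)
def zScan (st : List Char) (k x : Nat) : Nat :=
  if k + x < st.length ∧ st[x]? = st[k + x]? then zScan st k (x + 1) else x
termination_by st.length - (k + x)
decreasing_by omega

-- body of compute_Z's `for k in range(1, n)` loop; state = (l, r, z)
def zStep (st : List Char) (acc : Nat × Nat × List Nat) (k : Nat) : Nat × Nat × List Nat :=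
  match acc with
  | (l, r, z) =>
    if r ≤ k then
      let x := zScan st k 0
      (k, k + x, z.set k x)
    else if k + z.getD (k - l) 0 < r then
      (l, r, z.set k (z.getD (k - l) 0))
    else
      let x := zScan st k (r - k)
      (k, k + x, z.set k x)

def computeZ (st : List Char) : List Nat :=
  ((List.range' 1 (st.length - 1)).foldl (zStep st) (0, 1, List.replicate st.length 0)).2.2

def longestPreSuf (s : String) (t : String) : String :=
  let st := s.toList ++ t.toList
  let z := computeZ st
  let n := z.length
  let a := (List.range n).foldl (fun a k =>
      let val := z.getD k 0
      if k + val = n ∧ val ≤ min s.toList.length t.toList.length ∧ a < val then val else a) 0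
  String.ofList (s.toList.take a)

-- ===== PORT B =====
-- Source B's `for L in range(m, 0, -1)` downward scan, returning at the first matching L
def altScan (s t : List Char) (L : Nat) : String :=
  match L with
  | 0 => ""
  | Nat.succ L' =>
    if s.take (L' + 1) = t.drop (t.length - (L' + 1)) then String.ofList (s.take (L' + 1))
    else altScan s t L'

def longestPreSuf_alt (s : String) (t : String) : String :=
  altScan s.toList t.toList (min s.toList.length t.toList.length)

-- ===== PRECONDITION & SPEC =====
def Spec_longestPreSuf (s : String) (t : String) (out : String) : Prop := out = longestPreSuf_alt s t
instance (s : String) (t : String) (out : String) : Decidable (Spec_longestPreSuf s t out) := by unfold Spec_longestPreSuf; infer_instance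

-- ===== CLAIM (what is proved, stated in full; the proofs are below) =====
def Claim_equal_longestPreSuf : Prop := ∀ (s : String) (t : String), Dom_longestPreSuf s t → Spec_longestPreSuf s t (longestPreSuf s t)

-- ===== LEMMAS AND PROOFS =====

/-- length of the longest common prefix of two character lists -/
def lcp : List Char → List Char → Nat
  | a :: as, b :: bs => if a = b then lcp as bs + 1 else 0
  | _, _ => 0

theorem lcp_le_right (a b : List Char) : lcp a b ≤ b.length := by
  induction a generalizing b with
  | nil => simp [lcp]
  | cons x as ih =>
    cases b with
    | nil => simp [lcp]
    | cons y bs =>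
      simp only [lcp, List.length_cons]
      split
      · exact Nat.succ_le_succ (ih bs)
      · omega

theorem lcp_get (a b : List Char) : ∀ i < lcp a b, a[i]? = b[i]? := by
  induction a generalizing b with
  | nil => simp [lcp]
  | cons x as ih =>
    cases b with
    | nil => simp [lcp]
    | cons y bs =>
      intro i hi
      simp only [lcp] at hi
      split at hi
      · subst ‹x = y›
        cases i with
        | zero => rfl
        | succ i => simpa using ih bs i (by omega)
      · omega

theorem lcp_stop (a b : List Char) (h : lcp a b < a.length ∨ lcp a b < b.length) :
    a[lcp a b]? ≠ b[lcp a b]? := by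
  induction a generalizing b with
  | nil =>
    cases b with
    | nil => simp [lcp] at h
    | cons y bs => simp [lcp]
  | cons x as ih =>
    cases b with
    | nil => simp [lcp]
    | cons y bs =>
      simp only [lcp] at h ⊢
      split
      · next heq =>
        subst heq
        simp only [List.getElem?_cons_succ]
        apply ih
        simpa using h
      · next hne => simpa using hne

theorem lcp_ge (a b : List Char) (j : Nat) (hj : j ≤ a.length) (_hj2 : j ≤ b.length)
    (h : ∀ i < j, a[i]? = b[i]?) : j ≤ lcp a b := by
  by_contra hc
  push Not at hc
  exact lcp_stop a b (Or.inl (by omega)) (h _ hc)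

def Zc (st : List Char) (k : Nat) : Nat := lcp st (st.drop k)

theorem Zc_le (st : List Char) (k : Nat) : Zc st k ≤ st.length - k := by
  simpa using lcp_le_right st (st.drop k)

theorem Zc_get (st : List Char) (k : Nat) : ∀ i < Zc st k, st[i]? = st[k + i]? := by
  intro i hi
  have := lcp_get st (st.drop k) i hi
  rwa [List.getElem?_drop] at this

theorem zScan_stop (st : List Char) (k x : Nat) (hk : k ≤ st.length)
    (hx : x ≤ st.length - k) (h : ∀ i < x, st[i]? = st[k + i]?)
    (hstop : ¬(k + x < st.length ∧ st[x]? = st[k + x]?)) : x = Zc st k := by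
  have hge : x ≤ Zc st k :=
    lcp_ge st (st.drop k) x (by omega) (by simp; omega)
      (fun i hi => by rw [List.getElem?_drop]; exact h i hi)
  have hle : Zc st k ≤ x := by
    by_contra hc
    push Not at hc
    have h1 : x < st.length - k := lt_of_lt_of_le hc (Zc_le st k)
    exact hstop ⟨by omega, Zc_get st k x hc⟩
  omega

theorem zScan_eq (st : List Char) (k : Nat) (hk : k ≤ st.length) :
    ∀ x, x ≤ st.length - k → (∀ i < x, st[i]? = st[k + i]?) → zScan st k x = Zc st k := by
  have main : ∀ d x, st.length - (k + x) ≤ d → x ≤ st.length - k →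
      (∀ i < x, st[i]? = st[k + i]?) → zScan st k x = Zc st k := by
    intro d
    induction d with
    | zero =>
      intro x hd hx h
      rw [zScan]
      rw [if_neg (by omega)]
      exact zScan_stop st k x hk hx h (by omega)
    | succ d ih =>
      intro x hd hx h
      rw [zScan]
      split
      · next hcond =>
        exact ih (x + 1) (by omega) (by omega)
          (fun i hi => by
            rcases Nat.lt_succ_iff_lt_or_eq.mp hi with hi' | hi'
            · exact h i hi'
            · subst hi'; exact hcond.2)
      · next hcond => exact zScan_stop st k x hk hx h hcond
  exact fun x => main (st.length - (k + x)) x le_rfl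


theorem Zc_copy (st : List Char) (l k : Nat) (h1 : 1 ≤ l) (hlk : l < k) (hk : k ≤ st.length)
    (hcond : k + Zc st (k - l) < l + Zc st l) : Zc st k = Zc st (k - l) := by
  have hL : Zc st l ≤ st.length - l := Zc_le st l
  have hge : Zc st (k - l) ≤ Zc st k := by
    apply lcp_ge st (st.drop k) (Zc st (k - l)) (by omega) (by simp; omega)
    intro i hi
    rw [List.getElem?_drop]
    have e1 : st[i]? = st[k - l + i]? := Zc_get st (k - l) i hi
    have e2 : st[k - l + i]? = st[l + (k - l + i)]? := Zc_get st l (k - l + i) (by omega)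
    rw [e1, e2]
    congr 1
    omega
  have hle : Zc st k ≤ Zc st (k - l) := by
    by_contra hc
    push Not at hc
    have e1 : st[Zc st (k - l)]? = st[k + Zc st (k - l)]? := Zc_get st k _ hc
    have e2 : st[k - l + Zc st (k - l)]? = st[l + (k - l + Zc st (k - l))]? :=
      Zc_get st l _ (by omega)
    have e3 : l + (k - l + Zc st (k - l)) = k + Zc st (k - l) := by omega
    have hne : st[Zc st (k - l)]? ≠ (st.drop (k - l))[Zc st (k - l)]? :=
      lcp_stop st (st.drop (k - l)) (Or.inl (by show Zc st (k - l) < st.length; omega))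
    rw [List.getElem?_drop] at hne
    exact hne (by rw [e1, ← e3, ← e2])
  omega

theorem seg_scan (st : List Char) (l k : Nat) (_h1 : 1 ≤ l) (hlk : l < k) (hk : k ≤ st.length)
    (hge : l + Zc st l ≤ k + Zc st (k - l)) :
    ∀ i < l + Zc st l - k, st[i]? = st[k + i]? := by
  intro i hi
  have hL : Zc st l ≤ st.length - l := Zc_le st l
  have e1 : st[i]? = st[k - l + i]? := Zc_get st (k - l) i (by omega)
  have e2 : st[k - l + i]? = st[l + (k - l + i)]? := Zc_get st l _ (by omega)
  rw [e1, e2]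
  congr 1
  omega

theorem foldl_range'_induct {σ : Type} (f : σ → Nat → σ) (P : Nat → σ → Prop) :
    ∀ (m a : Nat) (init : σ), P a init →
      (∀ k s, a ≤ k → k < a + m → P k s → P (k + 1) (f s k)) →
      P (a + m) ((List.range' a m).foldl f init) := by
  intro m
  induction m with
  | zero => intro a init h _; simpa using h
  | succ m ih =>
    intro a init h hs
    rw [List.range'_succ, List.foldl_cons]
    have := ih (a + 1) (f init a) (hs a init le_rfl (by omega) h)
      (fun k s hk1 hk2 hp => hs k s (by omega) (by omega) hp)
    have heq : a + 1 + m = a + (m + 1) := by omega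
    rwa [heq] at this

def ZInv (st : List Char) (k : Nat) (acc : Nat × Nat × List Nat) : Prop :=
  acc.2.2.length = st.length ∧
  (∀ j < k, acc.2.2.getD j 0 = if j = 0 then 0 else Zc st j) ∧
  ((acc.1 = 0 ∧ acc.2.1 = 1) ∨ (1 ≤ acc.1 ∧ acc.1 < k ∧ acc.2.1 = acc.1 + Zc st acc.1))

theorem getD_set_self (z : List Nat) (k v : Nat) (h : k < z.length) :
    (z.set k v).getD k 0 = v := by simp [List.getD, h]

theorem getD_set_ne (z : List Nat) (k v j : Nat) (h : j ≠ k) :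
    (z.set k v).getD j 0 = z.getD j 0 := by
  simp [List.getD, List.getElem?_set]; rw [if_neg (Ne.symm h)]

theorem zStep_inv (st : List Char) (k : Nat) (acc : Nat × Nat × List Nat)
    (h1 : 1 ≤ k) (h2 : k < st.length) (h : ZInv st k acc) : ZInv st (k + 1) (zStep st acc k) := by
  obtain ⟨l, r, z⟩ := acc
  obtain ⟨hlen0, hz0, hlr⟩ := h
  have hlen : z.length = st.length := hlen0
  have hz : ∀ j < k, z.getD j 0 = if j = 0 then 0 else Zc st j := hz0
  replace hlr : (l = 0 ∧ r = 1) ∨ (1 ≤ l ∧ l < k ∧ r = l + Zc st l) := hlr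
  have hset : ∀ v j, j < k + 1 → (z.set k v).getD j 0 =
      if j = 0 then 0 else (if j = k then v else Zc st j) := by
    intro v j hj
    rcases Nat.lt_succ_iff_lt_or_eq.mp hj with hj' | hj'
    · rw [getD_set_ne z k v j (by omega), hz j hj']
      split_ifs <;> first | rfl | omega
    · rw [hj', getD_set_self z k v (by omega), if_neg (by omega), if_pos rfl]
  have hentries : ∀ v, v = Zc st k →
      ∀ j < k + 1, (z.set k v).getD j 0 = if j = 0 then 0 else Zc st j := by
    intro v hv j hj
    rw [hset v j hj]
    split_ifs <;> simp_all
  simp only [zStep]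
  split
  · -- r ≤ k
    next hrk =>
    have hzs : zScan st k 0 = Zc st k :=
      zScan_eq st k (le_of_lt h2) 0 (by omega) (by omega)
    refine ⟨by simpa using hlen, hentries _ hzs, Or.inr ⟨h1, by omega, by rw [hzs]⟩⟩
  · next hrk =>
    have hlr' : 1 ≤ l ∧ l < k ∧ r = l + Zc st l := by
      rcases hlr with ⟨hl0, hr1⟩ | h' 
      · omega
      · exact h'
    obtain ⟨hl1, hlk, hr⟩ := hlr'
    have hzj : z.getD (k - l) 0 = Zc st (k - l) := by
      rw [hz (k - l) (by omega), if_neg (by omega)]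
    split
    · -- copy branch
      next hcond =>
      rw [hzj] at hcond
      have hcopy : Zc st k = Zc st (k - l) :=
        Zc_copy st l k hl1 hlk (le_of_lt h2) (by omega)
      refine ⟨by simpa using hlen, hentries _ (by rw [hzj, ← hcopy]),
        Or.inr ⟨hl1, by omega, hr⟩⟩
    · -- rescan branch
      next hcond =>
      rw [hzj] at hcond
      have hLn : Zc st l ≤ st.length - l := Zc_le st l
      have hzs : zScan st k (r - k) = Zc st k := by
        apply zScan_eq st k (le_of_lt h2) (r - k) (by omega)
        intro i hi
        exact seg_scan st l k hl1 hlk (le_of_lt h2) (by omega) i (by omega)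
      refine ⟨by simpa using hlen, hentries _ hzs, Or.inr ⟨h1, by omega, by rw [hzs]⟩⟩

theorem computeZ_spec (st : List Char) :
    (computeZ st).length = st.length ∧
    (∀ j < st.length, (computeZ st).getD j 0 = if j = 0 then 0 else Zc st j) := by
  have base : ZInv st 1 (0, 1, List.replicate st.length 0) := by
    refine ⟨by simp, ?_, Or.inl ⟨rfl, rfl⟩⟩
    intro j hj
    have : j = 0 := by omega
    subst this
    cases st <;> simp [List.getD]
  have main := foldl_range'_induct (zStep st) (ZInv st) (st.length - 1) 1
    (0, 1, List.replicate st.length 0) base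
    (fun k s hk1 hk2 hp => zStep_inv st k s hk1 (by omega) hp)
  obtain ⟨hlen, hz, -⟩ := main
  exact ⟨hlen, fun j hj => hz j (by omega)⟩

theorem lcp_eq_length_iff (a b : List Char) (h : b.length ≤ a.length) :
    lcp a b = b.length ↔ a.take b.length = b := by
  constructor
  · intro he
    apply List.ext_getElem?
    intro i
    by_cases hi : i < b.length
    · rw [List.getElem?_take_of_lt hi]
      exact lcp_get a b i (by rw [he]; exact hi)
    · rw [List.getElem?_eq_none (by simpa using by omega),
        List.getElem?_eq_none (by omega)]
  · intro he
    have hge : b.length ≤ lcp a b := by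
      apply lcp_ge a b b.length h le_rfl
      intro i hi
      rw [← he, List.getElem?_take_of_lt hi]
    have := lcp_le_right a b
    omega

theorem prefix_iff (s t : List Char) (L : Nat) (h1 : 1 ≤ L) (hs : L ≤ s.length) (ht : L ≤ t.length) :
    Zc (s ++ t) (s.length + t.length - L) = L ↔ s.take L = t.drop (t.length - L) := by
  have hdrop : (s ++ t).drop (s.length + t.length - L) = t.drop (t.length - L) := by
    have h2 : s.length + t.length - L = s.length + (t.length - L) := by omega
    rw [h2, List.drop_append]
    simp
  have htake : (s ++ t).take L = s.take L := List.take_append_of_le_length hs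
  have hlen : (t.drop (t.length - L)).length = L := by simp; omega
  have hiff := lcp_eq_length_iff (s ++ t) (t.drop (t.length - L)) (by simp; omega)
  rw [hlen] at hiff
  rw [Zc, hdrop, hiff, htake]

def goodLP (s t : List Char) (L : Nat) : Prop :=
  1 ≤ L ∧ L ≤ min s.length t.length ∧ s.take L = t.drop (t.length - L)

theorem altScan_spec (s t : List Char) :
    ∀ m, m ≤ min s.length t.length →
      ∃ b, altScan s t m = String.ofList (s.take b) ∧
        (b = 0 ∨ (goodLP s t b ∧ b ≤ m)) ∧ (∀ L ≤ m, goodLP s t L → L ≤ b) := by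
  intro m
  induction m with
  | zero =>
    intro _
    refine ⟨0, by simp only [altScan, List.take_zero], Or.inl rfl, ?_⟩
    intro L hL hg
    have := hg.1
    omega
  | succ m ih =>
    intro hm
    rw [altScan]
    split
    · next heq =>
      refine ⟨m + 1, rfl, Or.inr ⟨⟨by omega, hm, heq⟩, le_rfl⟩, ?_⟩
      intro L hL _
      omega
    · next hne =>
      obtain ⟨b, hb, hb1, hb2⟩ := ih (by omega)
      refine ⟨b, hb, ?_, ?_⟩
      · rcases hb1 with h | h
        · exact Or.inl h
        · exact Or.inr ⟨h.1, by omega⟩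
      · intro L hL hg
        rcases Nat.lt_succ_iff_lt_or_eq.mp (Nat.lt_succ_of_le hL) with h | h
        · exact hb2 L (by omega) hg
        · exfalso; exact hne (h ▸ hg.2.2)

theorem foldl_max_spec (P Q : Nat → Prop) [DecidablePred P] [DecidablePred Q] (v : Nat → Nat) :
    ∀ (l : List Nat) (a : Nat),
      ((l.foldl (fun acc k => if P k ∧ Q k ∧ acc < v k then v k else acc) a) = a ∨
        ∃ k ∈ l, P k ∧ Q k ∧ (l.foldl (fun acc k => if P k ∧ Q k ∧ acc < v k then v k else acc) a) = v k) ∧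
      a ≤ (l.foldl (fun acc k => if P k ∧ Q k ∧ acc < v k then v k else acc) a) ∧
      (∀ k ∈ l, P k → Q k → v k ≤ (l.foldl (fun acc k => if P k ∧ Q k ∧ acc < v k then v k else acc) a)) := by
  intro l
  induction l with
  | nil => intro a; refine ⟨Or.inl rfl, le_rfl, by simp⟩
  | cons k l ih =>
    intro a
    simp only [List.foldl_cons]
    obtain ⟨ih1, ih2, ih3⟩ := ih (if P k ∧ Q k ∧ a < v k then v k else a)
    refine ⟨?_, ?_, ?_⟩
    · rcases ih1 with h | ⟨k', hk', hP, hQ, hr⟩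
      · rw [h]
        split
        · next hc => exact Or.inr ⟨k, List.mem_cons_self, hc.1, hc.2.1, rfl⟩
        · exact Or.inl rfl
      · exact Or.inr ⟨k', List.mem_cons_of_mem _ hk', hP, hQ, hr⟩
    · refine le_trans ?_ ih2
      split <;> omega
    · intro k' hk' hP hQ
      rcases List.mem_cons.mp hk' with h | h
      · subst h
        refine le_trans ?_ ih2
        split
        · omega
        · next hc => exact Nat.le_of_not_lt (fun hl => hc ⟨hP, hQ, hl⟩)
      · exact ih3 k' h hP hQ

theorem ports_eq (s t : String) : longestPreSuf s t = longestPreSuf_alt s t := by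
  simp only [longestPreSuf, longestPreSuf_alt]
  obtain ⟨hzlen, hzval⟩ := computeZ_spec (s.toList ++ t.toList)
  simp only [hzlen]
  have happ : (s.toList ++ t.toList).length = s.toList.length + t.toList.length :=
    List.length_append
  have hfm := foldl_max_spec
    (fun k => k + (computeZ (s.toList ++ t.toList)).getD k 0 = (s.toList ++ t.toList).length)
    (fun k => (computeZ (s.toList ++ t.toList)).getD k 0 ≤ min s.toList.length t.toList.length)
    (fun k => (computeZ (s.toList ++ t.toList)).getD k 0)
    (List.range (s.toList ++ t.toList).length) 0
  simp only [] at hfm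
  obtain ⟨hA1, -, hA3⟩ := hfm
  set r := (List.range (s.toList ++ t.toList).length).foldl (fun a k =>
      if k + (computeZ (s.toList ++ t.toList)).getD k 0 = (s.toList ++ t.toList).length ∧
        (computeZ (s.toList ++ t.toList)).getD k 0 ≤ min s.toList.length t.toList.length ∧
        a < (computeZ (s.toList ++ t.toList)).getD k 0
      then (computeZ (s.toList ++ t.toList)).getD k 0 else a) 0 with hr
  obtain ⟨b, hb, hb1, hb2⟩ := altScan_spec s.toList t.toList (min s.toList.length t.toList.length) le_rfl
  rw [hb]
  have hgood1 : r = 0 ∨ goodLP s.toList t.toList r := by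
    rcases hA1 with h | ⟨k, hk, hP, hQ, hrv⟩
    · exact Or.inl h
    · have hkn : k < (s.toList ++ t.toList).length := List.mem_range.mp hk
      have hk0 : k ≠ 0 := by
        intro h0
        subst h0
        rw [hzval 0 hkn, if_pos rfl] at hP
        omega
      have hv : (computeZ (s.toList ++ t.toList)).getD k 0 = Zc (s.toList ++ t.toList) k := by
        rw [hzval k hkn, if_neg hk0]
      rw [hv] at hP hQ hrv
      right
      have hL1 : 1 ≤ (s.toList ++ t.toList).length - k := by omega
      have hLd : Zc (s.toList ++ t.toList) k = (s.toList ++ t.toList).length - k := by omega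
      have hLm : (s.toList ++ t.toList).length - k ≤ min s.toList.length t.toList.length := by
        rw [hLd] at hQ; exact hQ
      have hpre := (prefix_iff s.toList t.toList ((s.toList ++ t.toList).length - k) hL1
        (by omega) (by omega)).mp (by rw [← happ, show (s.toList ++ t.toList).length - ((s.toList ++ t.toList).length - k) = k by omega, hLd])
      rw [hrv, hLd]
      exact ⟨hL1, hLm, hpre⟩
  have hgood2 : ∀ L, goodLP s.toList t.toList L → L ≤ r := by
    rintro L ⟨hL1, hLm, hLeq⟩
    have hLs : L ≤ s.toList.length := le_trans hLm (min_le_left _ _)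
    have hLt : L ≤ t.toList.length := le_trans hLm (min_le_right _ _)
    have hZ := (prefix_iff s.toList t.toList L hL1 hLs hLt).mpr hLeq
    rw [← happ] at hZ
    have hm := hA3 ((s.toList ++ t.toList).length - L)
      (List.mem_range.mpr (by omega))
      (by rw [hzval _ (by omega), if_neg (by omega), hZ]; omega)
      (by rw [hzval _ (by omega), if_neg (by omega), hZ]; exact hLm)
    rw [hzval _ (by omega), if_neg (by omega), hZ] at hm
    exact hm
  have hrb : r = b := by
    rcases hgood1 with h0 | hg
    · rcases hb1 with h | ⟨hgb, -⟩
      · omega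
      · have := hgood2 b hgb
        have := hgb.1
        omega
    · have h1 : r ≤ b := hb2 r hg.2.1 hg
      rcases hb1 with h | ⟨hgb, -⟩
      · have := hg.1; omega
      · have := hgood2 b hgb; omega
  rw [hrb]

-- ===== VERDICT (by name: the statement is the Claim_ definition above) =====
theorem longestPreSuf_spec : Claim_equal_longestPreSuf := by
  intro s t _
  exact ports_eq s t
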